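-- pv_equiv track=rewrite | github.com/kassymkuralay/Web-Dev | lab7/task1/codingbat/list2.py | sum13
-- ===== SOURCE A (Python) =====
-- def sum13(nums):
--   total = 0
--   i = 0
--   while i < len(nums):
--     if nums[i] == 13:
--       i += 2
--     else :
--       total += nums[i]
--       i += 1
--   return total
-- ===== SOURCE B (Python) =====
-- def sum13(nums):
--   total = 0
--   skip = False
--   for x in nums:
--     if skip:
--       skip = False
--     elif x == 13:
--       skip = True
--     else:
--       total += x
--   return total
-- ===== Notes on version B (the rewrite author's own statement) =====
-- stated objective: idiomatic
-- what changed: Replaces the index-jumping while loop (i += 2 after a 13) with a direct for-each loop carrying a boolean skip flag.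
import Mathlib
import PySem

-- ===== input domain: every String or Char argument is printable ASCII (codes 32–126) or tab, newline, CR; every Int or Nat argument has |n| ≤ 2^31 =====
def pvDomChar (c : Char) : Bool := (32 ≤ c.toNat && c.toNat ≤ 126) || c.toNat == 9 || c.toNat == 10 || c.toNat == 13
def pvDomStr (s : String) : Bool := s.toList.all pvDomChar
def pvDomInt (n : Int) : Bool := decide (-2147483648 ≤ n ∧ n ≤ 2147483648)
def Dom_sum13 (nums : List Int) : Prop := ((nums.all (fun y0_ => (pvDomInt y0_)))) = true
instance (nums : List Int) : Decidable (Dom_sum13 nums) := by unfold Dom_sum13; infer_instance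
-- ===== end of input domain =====

-- B replaces A's index-jumping while loop with a for-each loop carrying a boolean skip flag (idiomatic).


-- ===== PORT A =====
-- while i < len(nums): if nums[i]==13 then i+=2 else total+=nums[i]; i+=1
def sum13Loop (nums : List Int) (total : Int) (i : Nat) : Int :=
  if h : i < nums.length then
    if nums[i] = 13 then sum13Loop nums total (i + 2)
    else sum13Loop nums (total + nums[i]) (i + 1)
  else total
termination_by nums.length - i

def sum13 (nums : List Int) : Int := sum13Loop nums 0 0

-- ===== PORT B =====
-- for x in nums, state (total, skip)
def sum13AltStep (st : Int × Bool) (x : Int) : Int × Bool :=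
  if st.2 then (st.1, false)
  else if x = 13 then (st.1, true)
  else (st.1 + x, false)

def sum13_alt (nums : List Int) : Int := (nums.foldl sum13AltStep (0, false)).1

-- ===== PRECONDITION & SPEC =====
def Spec_sum13 (nums : List Int) (out : Int) : Prop := out = sum13_alt nums
instance (nums : List Int) (out : Int) : Decidable (Spec_sum13 nums out) := by unfold Spec_sum13; infer_instance

-- ===== CLAIM (what is proved, stated in full; the proofs are below) =====
def Claim_equal_sum13 : Prop := ∀ (nums : List Int), Dom_sum13 nums → Spec_sum13 nums (sum13 nums)

-- ===== LEMMAS AND PROOFS =====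

-- Loop invariant: A's loop at index i with accumulator t computes B's fold (with skip = false)
-- over the remaining suffix, added to t.
theorem sum13Loop_eq (nums : List Int) (t : Int) (i : Nat) :
    sum13Loop nums t i = (List.foldl sum13AltStep (t, false) (nums.drop i)).1 := by
  by_cases h : i < nums.length
  · rw [sum13Loop, dif_pos h, List.drop_eq_getElem_cons h]
    by_cases h13 : nums[i] = 13
    · rw [if_pos h13, sum13Loop_eq nums t (i + 2)]
      rw [List.foldl_cons]
      simp only [sum13AltStep, h13, Bool.false_eq_true, if_false, if_true]
      by_cases h1 : i + 1 < nums.length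
      · rw [List.drop_eq_getElem_cons h1, List.foldl_cons]
        simp [sum13AltStep]
      · rw [List.drop_eq_nil_iff.mpr (by omega), List.drop_eq_nil_iff.mpr (by omega)]
        rfl
    · rw [if_neg h13, sum13Loop_eq nums (t + nums[i]) (i + 1), List.foldl_cons]
      simp [sum13AltStep, h13]
  · rw [sum13Loop, dif_neg h, List.drop_eq_nil_iff.mpr (by omega)]
    rfl
termination_by nums.length - i

-- ===== VERDICT (by name: the statement is the Claim_ definition above) =====
theorem sum13_spec : Claim_equal_sum13 := by
  intro nums _
  unfold Spec_sum13 sum13 sum13_alt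
  simpa using sum13Loop_eq nums 0 0
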